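-- pv_equiv track=rewrite | github.com/maobukeai/M8 | ops/mirror/armature/__init__.py | _pair_name
-- ===== SOURCE A (Python) =====
-- def _pair_name(name: str) -> str | None:
--     suffix_map = {
--         ".L": ".R",
--         ".R": ".L",
--         ".l": ".r",
--         ".r": ".l",
--         "_L": "_R",
--         "_R": "_L",
--         "_l": "_r",
--         "_r": "_l",
--         "-L": "-R",
--         "-R": "-L",
--         "-l": "-r",
--         "-r": "-l",
--     }
--     for src, dst in suffix_map.items():
--         if name.endswith(src):
--             return name[: -len(src)] + dst
--     return None
-- ===== SOURCE B (Python) =====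
-- def _pair_name(name: str) -> str | None:
--     if len(name) < 2:
--         return None
--     sep, side = name[-2], name[-1]
--     if sep in ('.', '_', '-'):
--         swap = {'L': 'R', 'R': 'L', 'l': 'r', 'r': 'l'}
--         s = swap.get(side)
--         if s is not None:
--             return name[:-2] + sep + s
--     return None
-- ===== Notes on version B (the rewrite author's own statement) =====
-- stated objective: simpler
-- what changed: Replaced the linear scan over a 12-entry full-suffix map by a length guard plus independent checks of the separator character name[-2] and a 4-entry side-swap of name[-1].
import Mathlib
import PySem

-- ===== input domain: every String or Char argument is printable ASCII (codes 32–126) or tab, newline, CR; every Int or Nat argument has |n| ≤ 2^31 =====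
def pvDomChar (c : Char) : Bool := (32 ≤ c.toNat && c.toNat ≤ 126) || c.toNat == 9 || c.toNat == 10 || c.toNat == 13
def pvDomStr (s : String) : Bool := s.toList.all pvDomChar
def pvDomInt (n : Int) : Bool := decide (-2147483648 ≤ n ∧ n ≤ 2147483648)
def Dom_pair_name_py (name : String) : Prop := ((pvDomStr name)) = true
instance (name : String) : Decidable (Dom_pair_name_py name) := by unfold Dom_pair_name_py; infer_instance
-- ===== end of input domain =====

-- B replaces A's scan of a 12-entry full-suffix map by a length guard plus separate separator / side-letter checks (objective: simpler).

-- ===== PORT A =====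
-- A's suffix_map dict literal, in insertion order (12 distinct keys)
def pvSuffixMap : List (List Char × List Char) :=
  [(['.', 'L'], ['.', 'R']), (['.', 'R'], ['.', 'L']),
   (['.', 'l'], ['.', 'r']), (['.', 'r'], ['.', 'l']),
   (['_', 'L'], ['_', 'R']), (['_', 'R'], ['_', 'L']),
   (['_', 'l'], ['_', 'r']), (['_', 'r'], ['_', 'l']),
   (['-', 'L'], ['-', 'R']), (['-', 'R'], ['-', 'L']),
   (['-', 'l'], ['-', 'r']), (['-', 'r'], ['-', 'l'])]

-- A's for-loop over suffix_map.items(): first match wins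
def pvLoopA (name : List Char) : List (List Char × List Char) → Option (List Char)
  | [] => none
  | (src, dst) :: rest =>
    if PySem.Chars.endswith name src then
      some (PySem.List.slice name none (some (-(src.length : Int))) ++ dst)
    else pvLoopA name rest

def pair_name_py (name : String) : Option String :=
  (pvLoopA name.toList pvSuffixMap).map String.ofList

-- ===== PORT B =====
-- B's 4-entry side-swap dict
def pvSwap : PySem.Dict Char Char := PySem.Dict.ofList [('L', 'R'), ('R', 'L'), ('l', 'r'), ('r', 'l')]

def pvAltCore (l : List Char) : Option (List Char) :=
  if l.length < 2 then none
  else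
    match PySem.List.pyGet? l (-2), PySem.List.pyGet? l (-1) with
    | some sep, some side =>
      if sep ∈ ['.', '_', '-'] then
        match PySem.Dict.get? pvSwap side with
        | some s => some (PySem.List.slice l none (some (-2)) ++ [sep, s])
        | none => none
      else none
    | _, _ => none

def pair_name_py_alt (name : String) : Option String :=
  (pvAltCore name.toList).map String.ofList

-- ===== PRECONDITION & SPEC =====
def Spec_pair_name_py (name : String) (out : Option String) : Prop := out = pair_name_py_alt name
instance (name : String) (out : Option String) : Decidable (Spec_pair_name_py name out) := by unfold Spec_pair_name_py; infer_instance

-- ===== CLAIM (what is proved, stated in full; the proofs are below) =====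
def Claim_equal_pair_name_py : Prop := ∀ (name : String), Dom_pair_name_py name → Spec_pair_name_py name (pair_name_py name)

-- ===== LEMMAS AND PROOFS =====

theorem pv_endswith_two (m : List Char) (b a x y : Char) :
    PySem.Chars.endswith (m ++ [b, a]) [x, y] = (decide (b = x) && decide (a = y)) := by
  by_cases hb : b = x <;> by_cases ha : a = y <;> simp only [hb, ha, decide_true, decide_false,
    Bool.and_true, Bool.and_false, Bool.and_self]
  · rw [PySem.Chars.endswith_iff]
    exact List.suffix_append m [x, y]
  all_goals
    rw [← Bool.not_eq_true, PySem.Chars.endswith_iff]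
    rintro ⟨t, h⟩
    obtain ⟨-, h2⟩ := List.append_inj' h rfl
    simp_all

theorem pv_endswith_one (a x y : Char) : PySem.Chars.endswith [a] [x, y] = false := by
  rw [← Bool.not_eq_true, PySem.Chars.endswith_iff]
  intro h; simpa using h.length_le

theorem pv_swap_get (a : Char) : PySem.Dict.get? pvSwap a =
    (if a = 'L' then some 'R' else if a = 'R' then some 'L' else
     if a = 'l' then some 'r' else if a = 'r' then some 'l' else none) := by
  have h : pvSwap = PySem.Dict.mk [('L','R'),('R','L'),('l','r'),('r','l')] := by rfl
  rw [h]
  simp only [PySem.Dict.get?_mk_cons]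
  by_cases h1 : 'L' = a
  · subst h1; rfl
  by_cases h2 : 'R' = a
  · subst h2; rfl
  by_cases h3 : 'l' = a
  · subst h3; rfl
  by_cases h4 : 'r' = a
  · subst h4; rfl
  have h1' : ¬ a = 'L' := fun h => h1 h.symm
  have h2' : ¬ a = 'R' := fun h => h2 h.symm
  have h3' : ¬ a = 'l' := fun h => h3 h.symm
  have h4' : ¬ a = 'r' := fun h => h4 h.symm
  simp [h1, h2, h3, h4, h1', h2', h3', h4', PySem.Dict.get?]

theorem pv_core_eq (l : List Char) : pvLoopA l pvSuffixMap = pvAltCore l := by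
  rcases hl : l.reverse with _ | ⟨a, rest1⟩
  · have : l = [] := by simpa using congrArg List.reverse hl
    subst this; rfl
  · rcases rest1 with _ | ⟨b, rest⟩
    · have : l = [a] := by simpa using congrArg List.reverse hl
      subst this
      simp [pvLoopA, pvSuffixMap, pv_endswith_one, pvAltCore]
    · have hL : l = rest.reverse ++ [b, a] := by simpa using congrArg List.reverse hl
      subst hL
      have hsl : PySem.List.slice (rest.reverse ++ [b,a]) none (some (-2)) = rest.reverse := by
        rw [PySem.List.slice_to_neg_ofNat _ 2 (by omega)]
        simp
      have hg2 : PySem.List.pyGet? (rest.reverse ++ [b,a]) (-2) = some b := by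
        simp [PySem.List.pyGet?, PySem.List.pyIdx?]
      have hg1 : PySem.List.pyGet? (rest.reverse ++ [b,a]) (-1) = some a := by
        rw [PySem.List.pyGet?_neg_one]; simp
      simp only [pvLoopA, pvSuffixMap, pvAltCore, pv_endswith_two, hsl, hg2, hg1,
        List.length_append, List.length_cons, List.length_nil, pv_swap_get]
      by_cases hb1 : b = '.' <;> by_cases hb2 : b = '_' <;> by_cases hb3 : b = '-' <;>
        by_cases ha1 : a = 'L' <;> by_cases ha2 : a = 'R' <;> by_cases ha3 : a = 'l' <;>
        by_cases ha4 : a = 'r' <;>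
        simp_all

-- ===== VERDICT (by name: the statement is the Claim_ definition above) =====
theorem pair_name_py_spec : Claim_equal_pair_name_py := by
  intro name _
  unfold Spec_pair_name_py pair_name_py pair_name_py_alt
  rw [pv_core_eq]
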